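-- pv_equiv track=rewrite | github.com/sshkhr/metal-layernorm-torch | benchmarks/utils.py | resolve_kernels
-- ===== SOURCE A (Python) =====
-- KERNEL_ORDER = ["pytorch", "naive", "naive_1024", "shared", "simd",
--                 "vectorized", "fused", "robust", "regtiled"]
--
-- ALIASES = {
--     "k1": "naive", "k1b": "naive_1024",
--     "k2": "shared", "k3": "simd", "k4": "vectorized",
--     "k5": "fused", "k6": "robust", "k7": "regtiled",
-- }
--
-- def resolve_kernels(names: list[str],
--                     valid_kernels: list[str] | None = None) -> list[str]:
--     """Resolve kernel names/aliases to a canonical ordered list.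
--
--     Parameters
--     ----------
--     names : list[str]
--         Raw kernel names or aliases from the CLI (e.g. ["k4", "k7", "all"]).
--     valid_kernels : list[str] | None
--         If provided, overrides KERNEL_ORDER as both the set of accepted
--         kernels and the ordering of the result.  Useful for scripts that
--         should not accept "pytorch" (e.g. gpu_capture.py).
--     """
--     order = valid_kernels if valid_kernels is not None else KERNEL_ORDER
--     valid = set(order)
--
--     if "all" in names:
--         return list(order)
--
--     resolved = []
--     for name in names:
--         canonical = ALIASES.get(name.lower(), name.lower())
--         if canonical not in valid:
--             raise ValueError(
--                 f"Unknown kernel '{name}'. "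
--                 f"Choose from: {list(valid)} "
--                 f"or aliases {list(ALIASES.keys())} or 'all'")
--         if canonical not in resolved:
--             resolved.append(canonical)
--     # Sort by canonical order
--     return [k for k in order if k in resolved]
-- ===== SOURCE B (Python) =====
-- KERNEL_ORDER = ["pytorch", "naive", "naive_1024", "shared", "simd",
--                 "vectorized", "fused", "robust", "regtiled"]
--
-- ALIASES = {
--     "k1": "naive", "k1b": "naive_1024",
--     "k2": "shared", "k3": "simd", "k4": "vectorized",
--     "k5": "fused", "k6": "robust", "k7": "regtiled",
-- }
--
-- def resolve_kernels(names: list[str],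
--                     valid_kernels: list[str] | None = None) -> list[str]:
--     order = valid_kernels if valid_kernels is not None else KERNEL_ORDER
--     valid = set(order)
--
--     if "all" in names:
--         return list(order)
--
--     # staged passes: canonicalize everything, then validate, then sort the set
--     canon = [ALIASES.get(n.lower(), n.lower()) for n in names]
--     bad = [n for n, c in zip(names, canon) if c not in valid]
--     if bad:
--         raise ValueError(
--             f"Unknown kernel '{bad[0]}'. "
--             f"Choose from: {list(valid)} "
--             f"or aliases {list(ALIASES.keys())} or 'all'")
--     pos = {k: i for i, k in enumerate(order)}
--     return sorted(set(canon), key=pos.__getitem__)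
-- ===== Notes on version B (the rewrite author's own statement) =====
-- stated objective: alternative
-- what changed: B replaces A's single validating loop with an append-dedup accumulator and final order-scanning comprehension by staged whole-list passes: canonicalize all names with a map, validate by collecting the bad ones at once, then sort the set of canonicals by a position index built from enumerate(order).
-- outside the precondition, e.g. on resolve_kernels(['naive'], ['naive', 'naive']): A returns ['naive', 'naive'], B returns ['naive']
import Mathlib
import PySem

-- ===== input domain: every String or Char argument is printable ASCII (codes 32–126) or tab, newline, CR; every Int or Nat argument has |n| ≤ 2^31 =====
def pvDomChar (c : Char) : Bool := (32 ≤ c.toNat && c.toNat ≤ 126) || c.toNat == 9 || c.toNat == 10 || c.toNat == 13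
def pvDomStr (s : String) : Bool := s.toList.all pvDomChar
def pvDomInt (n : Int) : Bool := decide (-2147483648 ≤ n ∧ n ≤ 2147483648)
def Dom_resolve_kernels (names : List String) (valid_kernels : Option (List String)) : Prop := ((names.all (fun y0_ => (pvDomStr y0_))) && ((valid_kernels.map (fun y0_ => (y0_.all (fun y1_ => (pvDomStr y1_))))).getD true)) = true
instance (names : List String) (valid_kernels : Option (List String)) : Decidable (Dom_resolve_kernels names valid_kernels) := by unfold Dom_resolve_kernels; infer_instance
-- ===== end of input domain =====

-- B resolves in staged whole-list passes (map to canonicals, validate at once, key-sort the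
-- set by a position index) instead of A's accumulator loop + order-scanning comprehension
-- (objective: alternative decomposition, same cost).


-- shared module constants (KERNEL_ORDER, ALIASES) and the alias lookup
def pvKERNEL_ORDER : List String :=
  ["pytorch", "naive", "naive_1024", "shared", "simd",
   "vectorized", "fused", "robust", "regtiled"]

def pvALIASES : PySem.Dict String String :=
  PySem.Dict.ofList [("k1", "naive"), ("k1b", "naive_1024"),
    ("k2", "shared"), ("k3", "simd"), ("k4", "vectorized"),
    ("k5", "fused"), ("k6", "robust"), ("k7", "regtiled")]

-- ALIASES.get(name.lower(), name.lower())
def pvCanon (n : String) : String :=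
  (pvALIASES.get? (PySem.Str.lower n)).getD (PySem.Str.lower n)

-- ===== PORT A =====
-- A's validation loop building `resolved` (append if new); none = Python's ValueError
def pvALoop (order : List String) : List String → List String → Option (List String)
  | [], resolved => some resolved
  | n :: rest, resolved =>
      let c := pvCanon n
      if c ∈ order then
        pvALoop order rest (if c ∈ resolved then resolved else resolved ++ [c])
      else none  -- raise ValueError(...)

def resolve_kernels (names : List String) (valid_kernels : Option (List String)) : List String :=
  let order := valid_kernels.getD pvKERNEL_ORDER
  if "all" ∈ names then order
  else
    match pvALoop order names [] with
    | some resolved => order.filter (fun k => decide (k ∈ resolved))  -- [k for k in order if k in resolved]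
    | none => []  -- Python raises ValueError here; excluded by Pre_

-- ===== PORT B =====
-- pos = {k: i for i, k in enumerate(order)}
def pvPos (order : List String) : PySem.Dict String Int :=
  (PySem.List.enumerate order).foldl (fun d p => d.insert p.2 p.1) PySem.Dict.empty

def resolve_kernels_alt (names : List String) (valid_kernels : Option (List String)) : List String :=
  let order := valid_kernels.getD pvKERNEL_ORDER
  if "all" ∈ names then order
  else
    -- canon = [ALIASES.get(n.lower(), n.lower()) for n in names]
    let canon := names.map pvCanon
    -- bad = [n for n, c in zip(names, canon) if c not in valid]
    let bad := (names.zip canon).filter (fun p => decide (p.2 ∉ order))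
    if bad.isEmpty then
      -- sorted(set(canon), key=pos.__getitem__)
      PySem.List.sorted (PySem.Set.ofList canon) (fun k => (pvPos order).getD k 0) false
    else []  -- raise ValueError(f"Unknown kernel '{bad[0]}' …"); excluded by Pre_

-- ===== PRECONDITION & SPEC =====
-- Pre_ excludes (a) inputs with an unresolvable kernel name, on which A raises ValueError, and
-- (b) a valid_kernels list with duplicate entries, on which A's duplicated output and B's
-- deduplicated output are both accidental readings of a degenerate configuration.
def Pre_resolve_kernels (names : List String) (valid_kernels : Option (List String)) : Prop :=
  "all" ∈ names ∨
    ((∀ n ∈ names, pvCanon n ∈ valid_kernels.getD pvKERNEL_ORDER) ∧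
      (valid_kernels.getD pvKERNEL_ORDER).Nodup)
instance (names : List String) (valid_kernels : Option (List String)) : Decidable (Pre_resolve_kernels names valid_kernels) := by unfold Pre_resolve_kernels; infer_instance

def pvWitness_resolve_kernels : List String × Option (List String) := (["k4", "NAIVE", "k4"], none)

def Spec_resolve_kernels (names : List String) (valid_kernels : Option (List String)) (out : List String) : Prop := out = resolve_kernels_alt names valid_kernels
instance (names : List String) (valid_kernels : Option (List String)) (out : List String) : Decidable (Spec_resolve_kernels names valid_kernels out) := by unfold Spec_resolve_kernels; infer_instance

-- ===== CLAIM (what is proved, stated in full; the proofs are below) =====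
def Claim_equal_resolve_kernels : Prop := ∀ (names : List String) (valid_kernels : Option (List String)), Dom_resolve_kernels names valid_kernels → Pre_resolve_kernels names valid_kernels → Spec_resolve_kernels names valid_kernels (resolve_kernels names valid_kernels)

-- ===== LEMMAS AND PROOFS =====

-- A's loop succeeds when every name resolves inside `order`; its result is a Nodup
-- sublist-as-set of `order` whose members are exactly acc's plus the canonical names
theorem pvALoop_spec (order : List String) : ∀ (ns : List String) (acc : List String),
    (∀ n ∈ ns, pvCanon n ∈ order) → acc.Nodup → (∀ x ∈ acc, x ∈ order) →
    ∃ res, pvALoop order ns acc = some res ∧ res.Nodup ∧ (∀ x ∈ res, x ∈ order) ∧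
      (∀ x, x ∈ res ↔ x ∈ acc ∨ x ∈ ns.map pvCanon) := by
  intro ns
  induction ns with
  | nil =>
      intro acc _ h1 h2
      exact ⟨acc, rfl, h1, h2, by simp⟩
  | cons n rest ih =>
      intro acc hall hnd hsub
      have hc : pvCanon n ∈ order := hall n (by simp)
      simp only [pvALoop, hc, if_pos]
      by_cases hmem : pvCanon n ∈ acc
      · obtain ⟨res, h1, h2, h3, h4⟩ :=
          ih acc (fun m hm => hall m (by simp [hm])) hnd hsub
        refine ⟨res, by simpa [hmem] using h1, h2, h3, fun x => ?_⟩
        rw [h4]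
        constructor
        · rintro (h | h) <;> simp [h]
        · rintro (h | h)
          · exact Or.inl h
          · rcases (List.mem_map.1 h) with ⟨m, hm, rfl⟩
            rcases List.mem_cons.1 hm with rfl | hm'
            · exact Or.inl hmem
            · exact Or.inr (List.mem_map_of_mem hm')
      · have hnd' : (acc ++ [pvCanon n]).Nodup :=
          List.Nodup.append hnd (List.nodup_singleton _) (List.disjoint_singleton.2 hmem)
        have hsub' : ∀ x ∈ acc ++ [pvCanon n], x ∈ order := by
          intro x hx
          rcases List.mem_append.1 hx with h | h
          · exact hsub x h
          · simp at h; subst h; exact hc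
        obtain ⟨res, h1, h2, h3, h4⟩ :=
          ih (acc ++ [pvCanon n]) (fun m hm => hall m (by simp [hm])) hnd' hsub'
        refine ⟨res, by simpa [hmem] using h1, h2, h3, fun x => ?_⟩
        rw [h4]
        simp only [List.mem_append, List.map_cons, List.mem_cons]
        tauto

-- the position dictionary reads back the index of each element of a Nodup order
theorem pvPos_getD (order : List String) (hnd : order.Nodup) (i : Nat) (hi : i < order.length) :
    (pvPos order).getD order[i] 0 = (i : Int) := by
  have hitems : (pvPos order).items =
      PySem.Dict.empty.items ++ (PySem.List.enumerate order 0).map (fun a => (a.2, a.1)) :=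
    PySem.Dict.items_foldl_insert_fresh (PySem.List.enumerate order 0)
      (fun (p : Int × String) => p.2) (fun p => p.1) PySem.Dict.empty
      (fun a _ => PySem.Dict.contains_empty _)
      (by simpa [PySem.List.map_snd_enumerate] using hnd)
  have hmemenum : ((i : Int), order[i]) ∈ PySem.List.enumerate order 0 := by
    rw [PySem.List.mem_enumerate_iff]
    exact ⟨i, hi, by simp⟩
  have hempty : PySem.Dict.items (PySem.Dict.empty : PySem.Dict String Int) = [] := rfl
  have hmem : (order[i], (i : Int)) ∈ (pvPos order).items := by
    rw [hitems, hempty]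
    simp only [List.nil_append, List.mem_map]
    exact ⟨((i : Int), order[i]), hmemenum, rfl⟩
  have hkeys : (pvPos order).keys.Nodup := by
    have : (pvPos order).keys = (pvPos order).items.map (·.1) := rfl
    rw [this, hitems, hempty]
    simp only [List.nil_append, List.map_map]
    rw [show ((fun x : String × Int => x.1) ∘ fun a : Int × String => (a.2, a.1))
          = (fun a : Int × String => a.2) from rfl,
        PySem.List.map_snd_enumerate]
    exact hnd
  exact PySem.Dict.getD_of_mem_items _ hmem hkeys 0

-- the key-sort of a Nodup subset of `order` is the order-filtering comprehension
theorem pvSorted_filter (order res : List String) (hndo : order.Nodup)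
    (hnd : res.Nodup) (hsub : ∀ x ∈ res, x ∈ order) :
    PySem.List.sorted res (fun k => (pvPos order).getD k 0) false
      = order.filter (fun k => decide (k ∈ res)) := by
  apply PySem.List.sorted_eq_of_perm_of_pairwise_lt
  · rw [List.perm_ext_iff_of_nodup (hndo.filter _) hnd]
    intro a
    simp only [List.mem_filter, decide_eq_true_eq]
    exact ⟨fun h => h.2, fun h => ⟨hsub a h, h⟩⟩
  · have hp : order.Pairwise (fun a b => (pvPos order).getD a 0 < (pvPos order).getD b 0) := by
      rw [List.pairwise_iff_getElem]
      intro i j hi hj hij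
      rw [pvPos_getD order hndo i hi, pvPos_getD order hndo j hj]
      exact_mod_cast hij
    exact hp.sublist List.filter_sublist

-- ===== VERDICT (by name: the statement is the Claim_ definition above) =====
theorem resolve_kernels_spec : Claim_equal_resolve_kernels := by
  intro names vk _ hpre
  unfold Spec_resolve_kernels resolve_kernels resolve_kernels_alt
  by_cases hall : "all" ∈ names
  · simp [hall]
  · rcases hpre with h | ⟨hvalid, hnd⟩
    · exact absurd h hall
    simp only [hall, ite_false]
    obtain ⟨res, hres, hrnd, hrsub, hrmem⟩ :=
      pvALoop_spec (vk.getD pvKERNEL_ORDER) names [] hvalid List.nodup_nil (by simp)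
    rw [hres]
    -- B's `bad` list is empty: every canonical name is in order
    have hbad : ((names.zip (names.map pvCanon)).filter
        (fun p => decide (p.2 ∉ vk.getD pvKERNEL_ORDER))).isEmpty = true := by
      rw [List.isEmpty_iff, List.filter_eq_nil_iff]
      intro p hp
      rcases List.of_mem_zip hp with ⟨hp1, hp2⟩
      rcases List.mem_map.1 hp2 with ⟨m, hm, hpc⟩
      -- p.2 is the canonical of SOME name in names, hence in order
      simp only [decide_eq_true_eq, not_not, ← hpc]
      exact Decidable.not_not.1 (by simp [hvalid m hm])
    rw [hbad, if_pos rfl]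
    -- both sides: the Nodup set with the canonical names' membership, arranged by order
    have hset_nd : (PySem.Set.ofList (names.map pvCanon) : List String).Nodup :=
      PySem.Set.nodup_ofList _
    have hset_sub : ∀ x ∈ (PySem.Set.ofList (names.map pvCanon) : List String),
        x ∈ vk.getD pvKERNEL_ORDER := by
      intro x hx
      rcases List.mem_map.1 ((PySem.Set.mem_ofList _ _).1 hx) with ⟨m, hm, rfl⟩
      exact hvalid m hm
    rw [pvSorted_filter _ _ hnd hset_nd hset_sub]
    apply List.filter_congr
    intro k _
    simp only [decide_eq_decide, PySem.Set.mem_ofList]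
    rw [hrmem k]
    simp
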